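-- pv_equiv track=rewrite | github.com/merlinxdyang/en_corpus_skill_v2 | skills/public/english-corpus-prep/scripts/build_corpus.py | remove_signature_blocks
-- ===== SOURCE A (Python) =====
-- def remove_signature_blocks(lines: list[str], doc_type: str) -> list[str]:
--     if doc_type != "federal_register_pdf_text":
--         return lines
--     out = list(lines)
--     for marker in ("THE WHITE HOUSE,", "The White House,", "Andrei Iancu,"):
--         indexes = [idx for idx, line in enumerate(out) if line.strip().startswith(marker)]
--         if indexes and len(out) - indexes[-1] <= 25:
--             return out[: indexes[-1]]
--     return out
-- ===== SOURCE B (Python) =====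
-- def remove_signature_blocks(lines: list[str], doc_type: str) -> list[str]:
--     if doc_type != "federal_register_pdf_text":
--         return lines
--     # Single pass: remember the last index matching each marker.
--     last_wh_upper = last_wh_title = last_iancu = None
--     for idx, line in enumerate(lines):
--         s = line.strip()
--         if s.startswith("THE WHITE HOUSE,"):
--             last_wh_upper = idx
--         if s.startswith("The White House,"):
--             last_wh_title = idx
--         if s.startswith("Andrei Iancu,"):
--             last_iancu = idx
--     n = len(lines)
--     for last in (last_wh_upper, last_wh_title, last_iancu):
--         if last is not None and n - last <= 25:
--             return lines[:last]
--     return list(lines)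
-- ===== Notes on version B (the rewrite author's own statement) =====
-- stated objective: alternative
-- what changed: Replaces A's three separate whole-list filter passes (one enumerate+filter comprehension per marker) by a single pass that tracks the last matching index for each of the three markers, followed by a constant-size priority check.
import Mathlib
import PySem

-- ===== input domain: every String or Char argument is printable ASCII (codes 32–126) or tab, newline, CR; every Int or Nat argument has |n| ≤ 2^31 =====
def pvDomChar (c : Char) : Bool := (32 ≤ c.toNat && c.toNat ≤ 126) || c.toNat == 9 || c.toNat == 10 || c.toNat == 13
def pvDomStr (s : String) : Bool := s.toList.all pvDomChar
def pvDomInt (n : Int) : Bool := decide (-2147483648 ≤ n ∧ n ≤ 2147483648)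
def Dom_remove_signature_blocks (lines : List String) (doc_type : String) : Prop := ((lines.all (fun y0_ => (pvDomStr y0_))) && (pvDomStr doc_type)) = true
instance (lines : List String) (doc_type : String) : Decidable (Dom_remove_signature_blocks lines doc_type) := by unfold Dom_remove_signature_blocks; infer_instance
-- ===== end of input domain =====

-- B replaces A's three filter-the-whole-list passes (one per marker) by a single pass that
-- tracks the last matching index for each marker, then a constant-size priority check (objective: alternative).

-- ===== PORT A =====
-- indexes = [idx for idx, line in enumerate(out) if line.strip().startswith(marker)]
def rsbIndexes (out : List String) (marker : String) : List Int :=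
  ((PySem.List.enumerate out 0).filter
    (fun p => PySem.Str.startswith (PySem.Str.strip p.2) marker)).map Prod.fst

-- one iteration of A's marker loop: 'if indexes and len(out) - indexes[-1] <= 25: return out[:indexes[-1]]'
def rsbTry (out : List String) (marker : String) : Option (List String) :=
  match (rsbIndexes out marker).getLast? with
  | some i => if (out.length : Int) - i ≤ 25 then some (PySem.List.slice out none (some i)) else none
  | none => none

def remove_signature_blocks (lines : List String) (doc_type : String) : List String :=
  if doc_type ≠ "federal_register_pdf_text" then lines
  else
    let out := lines  -- out = list(lines): same list value
    match rsbTry out "THE WHITE HOUSE," with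
    | some r => r
    | none =>
      match rsbTry out "The White House," with
      | some r => r
      | none =>
        match rsbTry out "Andrei Iancu," with
        | some r => r
        | none => out

-- ===== PORT B =====
-- single pass over enumerate(lines): last index matched by each of the three markers
def rsbScan (lines : List String) : Option Int × Option Int × Option Int :=
  (PySem.List.enumerate lines 0).foldl
    (fun st p =>
      let s := PySem.Str.strip p.2
      ((if PySem.Str.startswith s "THE WHITE HOUSE," then some p.1 else st.1),
       (if PySem.Str.startswith s "The White House," then some p.1 else st.2.1),
       (if PySem.Str.startswith s "Andrei Iancu," then some p.1 else st.2.2)))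
    (none, none, none)

-- 'if last is not None and n - last <= 25: return lines[:last]'
def rsbCheck (lines : List String) (last? : Option Int) : Option (List String) :=
  match last? with
  | some i => if (lines.length : Int) - i ≤ 25 then some (PySem.List.slice lines none (some i)) else none
  | none => none

def remove_signature_blocks_alt (lines : List String) (doc_type : String) : List String :=
  if doc_type ≠ "federal_register_pdf_text" then lines
  else
    let st := rsbScan lines
    match rsbCheck lines st.1 with
    | some r => r
    | none =>
      match rsbCheck lines st.2.1 with
      | some r => r
      | none =>
        match rsbCheck lines st.2.2 with
        | some r => r
        | none => lines  -- list(lines): same list value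

-- ===== PRECONDITION & SPEC =====
def Spec_remove_signature_blocks (lines : List String) (doc_type : String) (out : List String) : Prop := out = remove_signature_blocks_alt lines doc_type
instance (lines : List String) (doc_type : String) (out : List String) : Decidable (Spec_remove_signature_blocks lines doc_type out) := by unfold Spec_remove_signature_blocks; infer_instance

-- ===== CLAIM (what is proved, stated in full; the proofs are below) =====
def Claim_equal_remove_signature_blocks : Prop := ∀ (lines : List String) (doc_type : String), Dom_remove_signature_blocks lines doc_type → Spec_remove_signature_blocks lines doc_type (remove_signature_blocks lines doc_type)

-- ===== LEMMAS AND PROOFS =====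

-- last element of a cons, as an Option.or fold step
lemma getLast?_cons_or {α : Type} (a : α) (t : List α) (z : Option α) :
    ((a :: t).getLast?).or z = (t.getLast?).or (some a) := by
  cases t with
  | nil => rfl
  | cons b t' =>
    rw [List.getLast?_cons_cons]
    obtain ⟨y, hy⟩ := Option.isSome_iff_exists.mp (by simp : (b :: t').getLast?.isSome)
    simp [hy]

-- helper naming A's per-marker last index over an arbitrary enumerated segment
def rsbLast (es : List (Int × String)) (marker : String) : Option Int :=
  ((es.filter (fun p => PySem.Str.startswith (PySem.Str.strip p.2) marker)).map Prod.fst).getLast?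

lemma rsbLast_cons (p : Int × String) (rest : List (Int × String)) (m : String) (z : Option Int) :
    (rsbLast (p :: rest) m).or z =
    (rsbLast rest m).or (if PySem.Str.startswith (PySem.Str.strip p.2) m then some p.1 else z) := by
  unfold rsbLast
  by_cases h : PySem.Str.startswith (PySem.Str.strip p.2) m = true
  · rw [List.filter_cons_of_pos (by simpa using h), if_pos h, List.map_cons, getLast?_cons_or]
  · rw [List.filter_cons_of_neg (by simpa using h), if_neg h]

lemma rsbScan_aux (l : List String) (s : Int) (st : Option Int × Option Int × Option Int) :
    (PySem.List.enumerate l s).foldl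
      (fun st p =>
        let s := PySem.Str.strip p.2
        ((if PySem.Str.startswith s "THE WHITE HOUSE," then some p.1 else st.1),
         (if PySem.Str.startswith s "The White House," then some p.1 else st.2.1),
         (if PySem.Str.startswith s "Andrei Iancu," then some p.1 else st.2.2))) st =
    ((rsbLast (PySem.List.enumerate l s) "THE WHITE HOUSE,").or st.1,
     (rsbLast (PySem.List.enumerate l s) "The White House,").or st.2.1,
     (rsbLast (PySem.List.enumerate l s) "Andrei Iancu,").or st.2.2) := by
  induction l generalizing s st with
  | nil => simp [PySem.List.enumerate_nil, rsbLast]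
  | cons x xs ih =>
    rw [PySem.List.enumerate_cons]
    rw [List.foldl_cons, ih]
    simp only [rsbLast_cons]

lemma rsbScan_eq (lines : List String) :
    rsbScan lines = ((rsbIndexes lines "THE WHITE HOUSE,").getLast?,
                     (rsbIndexes lines "The White House,").getLast?,
                     (rsbIndexes lines "Andrei Iancu,").getLast?) := by
  unfold rsbScan rsbIndexes
  rw [rsbScan_aux]
  simp [rsbLast]

-- ===== VERDICT (by name: the statement is the Claim_ definition above) =====
theorem remove_signature_blocks_spec : Claim_equal_remove_signature_blocks := by
  intro lines doc_type _
  unfold Spec_remove_signature_blocks remove_signature_blocks remove_signature_blocks_alt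
  by_cases h : doc_type = "federal_register_pdf_text"
  · rw [if_neg (by simp [h]), if_neg (by simp [h]), rsbScan_eq]
    rfl
  · rw [if_pos (by simp [h]), if_pos (by simp [h])]
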